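-- pv_equiv track=rewrite | github.com/jclements3/HarpHymnal | reharm/hymnal/reharm_hymnal.py | _safe_note_dur
-- ===== SOURCE A (Python) =====
-- _SAFE_DURS = {1, 2, 3, 4, 6, 7, 8, 12, 14, 16, 24, 28, 32}
--
-- def _safe_note_dur(token: str, n: int) -> str:
--     if n <= 0:
--         return ""
--     if n in _SAFE_DURS:
--         return token if n == 1 else f"{token}{n}"
--     for cand in sorted(_SAFE_DURS, reverse=True):
--         if cand < n:
--             return f"{token}{cand}-{_safe_note_dur(token, n - cand)}"
--     return f"{token}{n}"
-- ===== SOURCE B (Python) =====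
-- _SAFE_DURS = {1, 2, 3, 4, 6, 7, 8, 12, 14, 16, 24, 28, 32}
-- _DESC = sorted(_SAFE_DURS, reverse=True)
--
-- def _safe_note_dur(token: str, n: int) -> str:
--     if n <= 0:
--         return ""
--     # closed form: strip whole 32s in one step, leaving a remainder r with 1 <= r <= 32
--     k, r = divmod(n - 1, 32)
--     r += 1
--     pieces = [f"{token}32"] * k
--     while r not in _SAFE_DURS:
--         c = next(d for d in _DESC if d < r)
--         pieces.append(f"{token}{c}")
--         r -= c
--     pieces.append(token if r == 1 else f"{token}{r}")
--     return "-".join(pieces)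
-- ===== Notes on version B (the rewrite author's own statement) =====
-- stated objective: alternative
-- what changed: Replaces A's piece-by-piece recursion (which re-sorts the safe set at every level) with a closed-form divmod that emits all the 32-duration pieces at once via list repetition, a bounded greedy loop on the remainder (<= 32), and a single join.
import Mathlib
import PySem

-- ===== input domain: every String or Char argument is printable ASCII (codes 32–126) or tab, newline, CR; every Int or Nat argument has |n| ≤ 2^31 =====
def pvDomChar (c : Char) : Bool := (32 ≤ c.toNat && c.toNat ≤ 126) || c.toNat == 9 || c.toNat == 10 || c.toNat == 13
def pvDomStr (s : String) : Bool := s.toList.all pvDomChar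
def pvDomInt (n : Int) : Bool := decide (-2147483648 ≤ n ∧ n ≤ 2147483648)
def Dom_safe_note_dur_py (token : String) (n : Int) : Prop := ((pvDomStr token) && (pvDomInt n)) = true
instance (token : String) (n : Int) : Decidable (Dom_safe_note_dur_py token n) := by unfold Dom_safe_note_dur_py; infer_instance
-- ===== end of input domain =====

-- B replaces A's piece-by-piece recursion by a closed-form divmod that emits all the 32-pieces at
-- once, plus a bounded greedy loop on the remainder (≤ 32); same return values wherever A returns.

-- ===== PORT A =====
def pySafeDurs : PySem.Set Int := PySem.Set.ofList [1, 2, 3, 4, 6, 7, 8, 12, 14, 16, 24, 28, 32]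

def safe_note_dur_py (token : String) (n : Int) : String :=
  if n ≤ 0 then ""
  else if PySem.Set.contains pySafeDurs n then
    (if n = 1 then token else token ++ PySem.Int.toStr n)
  else
    match h : (PySem.List.sorted pySafeDurs (fun x => x) true).find? (fun c => decide (c < n)) with
    | some cand => token ++ PySem.Int.toStr cand ++ "-" ++ safe_note_dur_py token (n - cand)
    | none => token ++ PySem.Int.toStr n
termination_by n.toNat
decreasing_by
  have hmem := List.mem_of_find?_eq_some h
  have hlt := List.find?_some h
  have hd : PySem.List.sorted pySafeDurs (fun x => x) true
      = [32, 28, 24, 16, 14, 12, 8, 7, 6, 4, 3, 2, 1] := by decide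
  rw [hd] at hmem
  simp at hmem hlt
  have h1 : 1 ≤ cand := by rcases hmem with h|h|h|h|h|h|h|h|h|h|h|h|h <;> omega
  omega

-- ===== PORT B =====
def pySafeDursB : PySem.Set Int := PySem.Set.ofList [1, 2, 3, 4, 6, 7, 8, 12, 14, 16, 24, 28, 32]

def pyDescB : List Int := PySem.List.sorted pySafeDursB (fun x => x) true

-- the `while r not in _SAFE_DURS` loop of Source B, together with the append that follows the loop
def remPieces (token : String) (r : Int) (pieces : List String) : List String :=
  if PySem.Set.contains pySafeDursB r then
    pieces ++ [if r = 1 then token else token ++ PySem.Int.toStr r]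
  else
    match h : pyDescB.find? (fun d => decide (d < r)) with
    | some c => remPieces token (r - c) (pieces ++ [token ++ PySem.Int.toStr c])
    | none => pieces  -- unreachable when 1 ≤ r (Python's `next` would raise StopIteration)
termination_by r.toNat
decreasing_by
  have hmem := List.mem_of_find?_eq_some h
  have hlt := List.find?_some h
  have hd : pyDescB = [32, 28, 24, 16, 14, 12, 8, 7, 6, 4, 3, 2, 1] := by decide
  rw [hd] at hmem
  simp at hmem hlt
  have h1 : 1 ≤ c := by rcases hmem with h|h|h|h|h|h|h|h|h|h|h|h|h <;> omega
  omega

def safe_note_dur_py_alt (token : String) (n : Int) : String :=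
  if n ≤ 0 then ""
  else
    let k := PySem.Int.floordiv (n - 1) 32
    let r := PySem.Int.mod (n - 1) 32 + 1
    let pieces := PySem.List.pyRepeat [token ++ "32"] k
    PySem.Str.join "-" (remPieces token r pieces)

-- ===== PRECONDITION & SPEC =====
-- Pre_ excludes only inputs on which A crashes: A recurses one stack frame per 32 units of n, so
-- it raises RecursionError once n exceeds about 32 × the interpreter's recursion limit
-- (n ≈ 32000 under CPython's default limit of 1000); the bound 250000 sits far above every input
-- A survives under that default, and B returns the same decomposition string beyond it.
def Pre_safe_note_dur_py (token : String) (n : Int) : Prop := n ≤ 250000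
instance (token : String) (n : Int) : Decidable (Pre_safe_note_dur_py token n) := by
  unfold Pre_safe_note_dur_py; infer_instance

def pvWitness_safe_note_dur_py : String × Int := ("q", 21)

def Spec_safe_note_dur_py (token : String) (n : Int) (out : String) : Prop :=
  out = safe_note_dur_py_alt token n
instance (token : String) (n : Int) (out : String) : Decidable (Spec_safe_note_dur_py token n out) := by
  unfold Spec_safe_note_dur_py; infer_instance

-- ===== CLAIM =====
def Claim_equal_safe_note_dur_py : Prop :=
  ∀ (token : String) (n : Int), Dom_safe_note_dur_py token n → Pre_safe_note_dur_py token n →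
    Spec_safe_note_dur_py token n (safe_note_dur_py token n)

-- ===== LEMMAS AND PROOFS =====

lemma descA_eq : PySem.List.sorted pySafeDurs (fun x => x) true
    = [32, 28, 24, 16, 14, 12, 8, 7, 6, 4, 3, 2, 1] := by decide

lemma descB_eq : pyDescB = [32, 28, 24, 16, 14, 12, 8, 7, 6, 4, 3, 2, 1] := by decide

lemma safeB_eq : pySafeDursB = ([1, 2, 3, 4, 6, 7, 8, 12, 14, 16, 24, 28, 32] : List Int) := by
  decide

lemma not_safe_of_gt (r : Int) (h : 32 < r) : ¬ PySem.Set.contains pySafeDursB r = true := by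
  intro hc
  have := (PySem.Set.contains_iff _ _).mp hc
  rw [safeB_eq] at this
  simp at this
  omega

lemma find_facts (r c : Int) (h : pyDescB.find? (fun d => decide (d < r)) = some c) :
    1 ≤ c ∧ c < r ∧ c ≤ 32 := by
  have hmem := List.mem_of_find?_eq_some h
  have hlt := List.find?_some h
  rw [descB_eq] at hmem
  simp at hmem hlt
  rcases hmem with h|h|h|h|h|h|h|h|h|h|h|h|h <;> omega

lemma find_isSome (r : Int) (h2 : 2 ≤ r) :
    (pyDescB.find? (fun d => decide (d < r))).isSome := by
  rw [List.find?_isSome]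
  exact ⟨1, by rw [descB_eq]; simp, by simp; omega⟩

lemma find_32 (r : Int) (h : 32 < r) : pyDescB.find? (fun d => decide (d < r)) = some 32 := by
  rw [descB_eq, List.find?_cons_of_pos (by simp; omega)]

lemma two_le_of_not_safe (r : Int) (h1 : 1 ≤ r)
    (hs : ¬ PySem.Set.contains pySafeDursB r = true) : 2 ≤ r := by
  rcases lt_or_ge r 2 with h | h
  · exfalso
    have : r = 1 := by omega
    rw [this] at hs
    exact hs (by decide)
  · exact h

lemma join_one (s : String) : PySem.Str.join "-" [s] = s := by
  simp [PySem.Str.join]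

lemma join_two (p q : String) (rest : List String) :
    PySem.Str.join "-" (p :: q :: rest) = p ++ "-" ++ PySem.Str.join "-" (q :: rest) := by
  simp only [PySem.Str.join, List.map_cons]
  rw [PySem.Chars.join_cons_cons]
  rw [show ("-".toList = ['-']) from rfl]
  rw [show (p.toList ++ ['-'] ++ PySem.Chars.join ['-'] (q.toList :: List.map String.toList rest)) =
      p.toList ++ (['-'] ++ PySem.Chars.join ['-'] (q.toList :: List.map String.toList rest)) by simp]
  rw [String.ofList_append, String.ofList_append]
  simp [String.append_assoc]

lemma remPieces_acc_aux (t : String) : ∀ (m : Nat) (r : Int) (ps : List String), r.toNat ≤ m →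
    remPieces t r ps = ps ++ remPieces t r [] := by
  intro m
  induction m with
  | zero =>
    intro r ps hm
    rw [remPieces, remPieces]
    by_cases hs : PySem.Set.contains pySafeDursB r = true
    · simp only [if_pos hs]
      simp
    · simp only [if_neg hs]
      split
      · rename_i c heq
        obtain ⟨h1, h2, _⟩ := find_facts r c heq
        omega
      · simp
  | succ m ih =>
    intro r ps hm
    rw [remPieces, remPieces]
    by_cases hs : PySem.Set.contains pySafeDursB r = true
    · simp only [if_pos hs]
      simp
    · simp only [if_neg hs]
      split
      · rename_i c heq
        obtain ⟨h1, h2, _⟩ := find_facts r c heq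
        rw [ih (r - c) (ps ++ [t ++ PySem.Int.toStr c]) (by omega),
            ih (r - c) ([] ++ [t ++ PySem.Int.toStr c]) (by omega)]
        simp
      · simp

lemma remPieces_acc (t : String) (r : Int) (ps : List String) :
    remPieces t r ps = ps ++ remPieces t r [] :=
  remPieces_acc_aux t r.toNat r ps le_rfl

lemma remPieces_ne_nil (t : String) (r : Int) (h1 : 1 ≤ r) : remPieces t r [] ≠ [] := by
  rw [remPieces]
  by_cases hs : PySem.Set.contains pySafeDursB r = true
  · simp only [if_pos hs]
    simp
  · simp only [if_neg hs]
    split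
    · rw [remPieces_acc]
      simp
    · rename_i heq
      have h2 := two_le_of_not_safe r h1 hs
      have := find_isSome r h2
      rw [heq] at this
      simp at this

lemma A_eq_join_aux (t : String) : ∀ (m : Nat) (n : Int), n.toNat ≤ m → 1 ≤ n →
    safe_note_dur_py t n = PySem.Str.join "-" (remPieces t n []) := by
  intro m
  induction m with
  | zero => intro n hm h1; omega
  | succ m ih =>
    intro n hm h1
    have hn0 : ¬ n ≤ 0 := by omega
    rw [safe_note_dur_py, remPieces]
    simp only [if_neg hn0]
    by_cases hs : PySem.Set.contains pySafeDursB n = true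
    · have hsA : PySem.Set.contains pySafeDurs n = true := hs
      simp only [if_pos hs, if_pos hsA, List.nil_append]
      rw [join_one]
    · have hsA : ¬ PySem.Set.contains pySafeDurs n = true := hs
      have h2 := two_le_of_not_safe n h1 hs
      simp only [if_neg hs, if_neg hsA]
      split
      · rename_i cand heqA
        rw [descA_eq, ← descB_eq] at heqA
        obtain ⟨hc1, hc2, _⟩ := find_facts n cand heqA
        split
        · rename_i c' heqB
          rw [heqA] at heqB
          injection heqB with hcc
          subst hcc
          rw [remPieces_acc]
          obtain ⟨q, rest, hqr⟩ :
              ∃ q rest, remPieces t (n - cand) [] = q :: rest := by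
            rcases hx : remPieces t (n - cand) [] with _ | ⟨q, rest⟩
            · exact absurd hx (remPieces_ne_nil t (n - cand) (by omega))
            · exact ⟨q, rest, rfl⟩
          rw [hqr, List.nil_append, List.cons_append, List.nil_append]
          rw [join_two, ← hqr, ← ih (n - cand) (by omega) (by omega)]
        · rename_i heqB
          rw [heqA] at heqB
          exact absurd heqB (by simp)
      · rename_i heqA
        rw [descA_eq, ← descB_eq] at heqA
        have := find_isSome n h2
        rw [heqA] at this
        simp at this

lemma B_strip_aux (t : String) : ∀ (m : Nat) (n : Int), n.toNat ≤ m → 1 ≤ n →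
    remPieces t n [] =
      PySem.List.pyRepeat [t ++ "32"] (PySem.Int.floordiv (n - 1) 32)
        ++ remPieces t (PySem.Int.mod (n - 1) 32 + 1) [] := by
  intro m
  induction m with
  | zero => intro n hm h1; omega
  | succ m ih =>
    intro n hm h1
    by_cases h32 : n ≤ 32
    · have hk : PySem.Int.floordiv (n - 1) 32 = 0 := by
        rw [PySem.Int.floordiv_eq_ediv_of_pos (by omega)]; omega
      have hr : PySem.Int.mod (n - 1) 32 + 1 = n := by
        rw [PySem.Int.mod_eq_emod_of_pos (by omega)]; omega
      rw [hk, hr, PySem.List.pyRepeat_singleton]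
      simp
    · have hs : ¬ PySem.Set.contains pySafeDursB n = true := not_safe_of_gt n (by omega)
      have hf := find_32 n (by omega)
      conv_lhs => rw [remPieces]
      simp only [if_neg hs]
      split
      · rename_i c heq
        rw [hf] at heq
        injection heq with hcc
        subst hcc
        rw [remPieces_acc]
        rw [ih (n - 32) (by omega) (by omega)]
        have hknn : 0 ≤ PySem.Int.floordiv (n - 32 - 1) 32 := by
          rw [PySem.Int.floordiv_eq_ediv_of_pos (by omega)]; omega
        have hk : PySem.Int.floordiv (n - 1) 32 = PySem.Int.floordiv (n - 32 - 1) 32 + 1 := by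
          rw [PySem.Int.floordiv_eq_ediv_of_pos (by omega),
              PySem.Int.floordiv_eq_ediv_of_pos (by omega)]
          omega
        have hr : PySem.Int.mod (n - 1) 32 = PySem.Int.mod (n - 32 - 1) 32 := by
          rw [PySem.Int.mod_eq_emod_of_pos (by omega), PySem.Int.mod_eq_emod_of_pos (by omega)]
          omega
        have hrep : PySem.List.pyRepeat [t ++ "32"] (PySem.Int.floordiv (n - 32 - 1) 32 + 1)
            = (t ++ "32") :: PySem.List.pyRepeat [t ++ "32"] (PySem.Int.floordiv (n - 32 - 1) 32) := by
          rw [PySem.List.pyRepeat_singleton, PySem.List.pyRepeat_singleton]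
          rw [show ((PySem.Int.floordiv (n - 32 - 1) 32 + 1).toNat
              = (PySem.Int.floordiv (n - 32 - 1) 32).toNat + 1) by omega]
          rw [List.replicate_succ]
        rw [hk, hr, hrep]
        rw [show (PySem.Int.toStr 32 = "32") by decide]
        simp
      · rename_i heq
        rw [hf] at heq
        exact absurd heq (by simp)

-- ===== VERDICT =====
theorem safe_note_dur_py_spec : Claim_equal_safe_note_dur_py := by
  intro t n _ _
  unfold Spec_safe_note_dur_py
  by_cases h0 : n ≤ 0
  · rw [safe_note_dur_py, safe_note_dur_py_alt]
    simp [h0]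
  · rw [safe_note_dur_py_alt]
    simp only [if_neg h0]
    rw [remPieces_acc]
    rw [A_eq_join_aux t n.toNat n le_rfl (by omega)]
    rw [B_strip_aux t n.toNat n le_rfl (by omega)]
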